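-- pv_equiv track=rewrite | github.com/chulbioinfo/ReAlignPro | src/realignpro/tsv2fig.py | _motif_indices
-- ===== SOURCE A (Python) =====
-- from typing import Dict, List, Optional, Set, Tuple
--
-- def _motif_indices(seq: str, motif: str) -> Set[int]:
--     idxs: Set[int] = set()
--     m = len(motif)
--     start = 0
--     while True:
--         start = seq.find(motif, start)
--         if start == -1:
--             break
--         idxs.update(range(start, start + m))
--         start += 1
--     return idxs
-- ===== SOURCE B (Python) =====
-- def _motif_indices(seq, motif):
--     # Per-index coverage test: an index i is covered exactly when some window
--     # seq[s:s+m] equal to the motif starts within the last m positions up to i.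
--     m = len(motif)
--     return {i for i in range(len(seq))
--             if any(seq[s:s + m] == motif for s in range(max(0, i - m + 1), i + 1))}
-- ===== Notes on version B (the rewrite author's own statement) =====
-- stated objective: alternative
-- what changed: Replaces A's find-driven scan over matches (repeated str.find plus set.update of each window) with a direct per-index coverage test: a comprehension over all positions that asks whether any motif-sized window ending at or after the position equals the motif.
import Mathlib
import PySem

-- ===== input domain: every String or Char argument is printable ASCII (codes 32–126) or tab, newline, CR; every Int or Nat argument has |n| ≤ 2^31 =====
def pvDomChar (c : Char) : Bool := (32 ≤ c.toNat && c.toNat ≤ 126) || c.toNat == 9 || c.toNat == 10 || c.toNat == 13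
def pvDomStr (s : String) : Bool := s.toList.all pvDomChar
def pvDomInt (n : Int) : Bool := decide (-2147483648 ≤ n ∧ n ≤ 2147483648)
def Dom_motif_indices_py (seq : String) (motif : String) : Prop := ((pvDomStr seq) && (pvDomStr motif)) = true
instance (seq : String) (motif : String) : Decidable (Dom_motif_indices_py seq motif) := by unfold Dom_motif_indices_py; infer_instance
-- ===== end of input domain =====

-- B replaces A's find-driven scan over matches (set.update of each match window)
-- by a direct per-index coverage test over all positions; equal results proved below.

-- ===== PORT A =====
-- A's while-loop as fuel recursion: each iteration's search position grows by at
-- least 1 and find fails once it passes len(seq), so length+1 fuel is enough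
-- (and at fuel 0 the loop would return the accumulator unchanged anyway).
def motifIndicesALoop (seq motif : List Char) (m : Nat) : Nat → Int → List Int → List Int
  | 0, _, idxs => idxs
  | fuel+1, start, idxs =>
    let s := PySem.Chars.findFrom seq motif start none
    if s = -1 then idxs
    else motifIndicesALoop seq motif m fuel (s + 1)
      (PySem.Set.update idxs (PySem.List.pyRange s (s + (m : Int)) 1))

def motif_indices_py (seq : String) (motif : String) : List Int :=
  motifIndicesALoop seq.toList motif.toList motif.toList.length (seq.toList.length + 1) 0 []

-- ===== PORT B =====
-- Source B's set comprehension: for each i in range(len(seq)), keep i iff some slice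
-- seq[s:s+m] with s in range(max(0, i-m+1), i+1) equals the motif.
def motif_indices_py_alt (seq : String) (motif : String) : List Int :=
  PySem.Set.ofList ((PySem.List.pyRange 0 seq.toList.length 1).filter (fun i =>
    (PySem.List.pyRange (max 0 (i - (motif.toList.length : Int) + 1)) (i + 1) 1).any (fun s =>
      PySem.List.slice seq.toList (some s) (some (s + (motif.toList.length : Int))) == motif.toList)))

-- ===== PRECONDITION & SPEC =====
def Spec_motif_indices_py (seq : String) (motif : String) (out : List Int) : Prop := out = motif_indices_py_alt seq motif
instance (seq : String) (motif : String) (out : List Int) : Decidable (Spec_motif_indices_py seq motif out) := by unfold Spec_motif_indices_py; infer_instance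

-- ===== CLAIM (what is proved, stated in full; the proofs are below) =====
def Claim_equal_motif_indices_py : Prop := ∀ (seq : String) (motif : String), Dom_motif_indices_py seq motif → Spec_motif_indices_py seq motif (motif_indices_py seq motif)

-- ===== LEMMAS AND PROOFS =====

-- x is covered by some motif occurrence (start s, window [s, s+m)).
def MotifCov (sl ml : List Char) (x : Int) : Prop :=
  ∃ s : Nat, ml <+: sl.drop s ∧ (s : Int) ≤ x ∧ x < (s : Int) + ml.length

-- x is covered by some occurrence with start < k (A's loop has processed starts < k).
def MotifCovB (sl ml : List Char) (k : Nat) (x : Int) : Prop :=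
  ∃ s : Nat, s < k ∧ ml <+: sl.drop s ∧ (s : Int) ≤ x ∧ x < (s : Int) + ml.length

-- An occurrence of a nonempty motif fits inside the string.
lemma occ_bound {sl ml : List Char} {s : Nat} (h : ml <+: sl.drop s) (hne : ml ≠ []) :
    s + ml.length ≤ sl.length := by
  have h1 := h.length_le
  have h2 : (sl.drop s).length = sl.length - s := List.length_drop ..
  have h3 : 0 < ml.length := List.length_pos_iff.mpr hne
  omega

lemma cov_of_covB {sl ml : List Char} {k : Nat} {x : Int} (h : MotifCovB sl ml k x) :
    MotifCov sl ml x := by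
  obtain ⟨s, _, h1, h2, h3⟩ := h
  exact ⟨s, h1, h2, h3⟩

lemma covB_of_cov_big {sl ml : List Char} {k : Nat} {x : Int} (hk : sl.length ≤ k)
    (h : MotifCov sl ml x) : MotifCovB sl ml k x := by
  obtain ⟨s, h1, h2, h3⟩ := h
  have hne : ml ≠ [] := by
    rintro rfl; simp at h3; omega
  have := occ_bound h1 hne
  have hml : 0 < ml.length := List.length_pos_iff.mpr hne
  exact ⟨s, by omega, h1, h2, h3⟩

lemma covB_of_cov_no_occ {sl ml : List Char} {k : Nat} {x : Int}
    (hno : ¬ ml <:+: sl.drop k) (h : MotifCov sl ml x) : MotifCovB sl ml k x := by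
  obtain ⟨s, h1, h2, h3⟩ := h
  by_cases hs : s < k
  · exact ⟨s, hs, h1, h2, h3⟩
  · exfalso
    apply hno
    have hdd : (sl.drop k).drop (s - k) = sl.drop s := by
      rw [List.drop_drop]; congr 1; omega
    exact List.IsInfix.trans (hdd ▸ h1.isInfix) (List.drop_suffix _ _).isInfix

-- find with a start index past the end of the string fails (CPython's rule).
lemma findFrom_past_len (seq motif : List Char) (k : Int) (h : (seq.length : Int) < k) :
    PySem.Chars.findFrom seq motif k none = -1 := by
  simp only [PySem.Chars.findFrom]
  split_ifs <;> omega

-- Set.update keeps strict sortedness when every genuinely new element is above all of S.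
lemma pairwise_update : ∀ (r S : List Int), S.Pairwise (· < ·) → r.Pairwise (· < ·) →
    (∀ x ∈ S, ∀ j ∈ r, j ∉ S → x < j) → (PySem.Set.update S r).Pairwise (· < ·) := by
  intro r
  induction r with
  | nil => intro S hS _ _; simpa [PySem.Set.update] using hS
  | cons a r ih =>
    intro S hS hr hcross
    rw [PySem.Set.update_cons]
    by_cases ha : a ∈ S
    · rw [PySem.Set.add_of_mem ha]
      exact ih S hS (List.Pairwise.sublist (List.sublist_cons_self a r) hr)
        (fun x hx j hj hjn => hcross x hx j (List.mem_cons_of_mem a hj) hjn)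
    · rw [PySem.Set.add_of_not_mem ha]
      refine ih (S ++ [a]) ?_ (List.Pairwise.sublist (List.sublist_cons_self a r) hr) ?_
      · rw [List.pairwise_append]
        refine ⟨hS, by simp, ?_⟩
        intro x hx b hb
        simp only [List.mem_singleton] at hb
        rw [hb]
        exact hcross x hx a (by simp) ha
      · intro x hx j hj hjn
        rw [List.mem_append] at hx hjn
        push Not at hjn
        rcases hx with hx | hx
        · exact hcross x hx j (List.mem_cons_of_mem a hj) hjn.1
        · simp only [List.mem_singleton] at hx
          subst hx
          exact List.rel_of_pairwise_cons hr hj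

-- Master invariant for A's loop: from search position k with accumulator exactly the
-- indices covered by occurrences before k, the loop returns a strictly sorted list
-- whose members are exactly the covered indices.
lemma aLoop_spec (sl ml : List Char) :
    ∀ (fuel k : Nat) (S : List Int),
    sl.length + 1 ≤ fuel + k →
    S.Pairwise (· < ·) →
    (∀ x, x ∈ S ↔ MotifCovB sl ml k x) →
    (motifIndicesALoop sl ml ml.length fuel (k : Int) S).Pairwise (· < ·) ∧
    (∀ x, x ∈ motifIndicesALoop sl ml ml.length fuel (k : Int) S ↔ MotifCov sl ml x) := by
  intro fuel
  induction fuel with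
  | zero =>
    intro k S hfuel hS hmem
    refine ⟨hS, fun x => ?_⟩
    simp only [motifIndicesALoop]
    rw [hmem x]
    exact ⟨cov_of_covB, covB_of_cov_big (by omega)⟩
  | succ fuel ih =>
    intro k S hfuel hS hmem
    simp only [motifIndicesALoop]
    by_cases hneg : PySem.Chars.findFrom sl ml (k : Int) none = -1
    · simp only [hneg, if_true]
      refine ⟨hS, fun x => ?_⟩
      rw [hmem x]
      by_cases hk : k ≤ sl.length
      · have hno : ¬ ml <:+: sl.drop k :=
          (PySem.Chars.findFrom_natCast_eq_neg_one_iff sl ml k hk).mp hneg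
        exact ⟨cov_of_covB, covB_of_cov_no_occ hno⟩
      · exact ⟨cov_of_covB, covB_of_cov_big (by omega)⟩
    · simp only [hneg]
      rw [if_false]
      have hk : k ≤ sl.length := by
        by_contra hgt
        exact hneg (findFrom_past_len sl ml k (by omega))
      obtain ⟨hkf, hpre, hmin⟩ := PySem.Chars.findFrom_natCast_spec sl ml k hk hneg
      set f := PySem.Chars.findFrom sl ml (k : Int) none with hf
      have hf0 : 0 ≤ f := le_trans (by positivity) hkf
      have hfN : ((f.toNat : Nat) : Int) = f := Int.toNat_of_nonneg hf0
      -- the updated accumulator is exactly the indices covered before f.toNat + 1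
      have hmem' : ∀ x, x ∈ PySem.Set.update S (PySem.List.pyRange f (f + (ml.length : Int)) 1) ↔
          MotifCovB sl ml (f.toNat + 1) x := by
        intro x
        rw [PySem.Set.mem_update, hmem x, PySem.List.mem_pyRange_one]
        constructor
        · rintro (⟨s, hs, h1, h2, h3⟩ | ⟨h1, h2⟩)
          · exact ⟨s, by omega, h1, h2, h3⟩
          · exact ⟨f.toNat, by omega, hpre, by omega, by omega⟩
        · rintro ⟨s, hs, h1, h2, h3⟩
          by_cases hsk : s < k
          · exact Or.inl ⟨s, hsk, h1, h2, h3⟩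
          · have hsf : s = f.toNat := by
              by_contra hne
              exact hmin s (by omega) (by omega) h1
            subst hsf
            exact Or.inr ⟨by omega, by omega⟩
      have hpair' : (PySem.Set.update S (PySem.List.pyRange f (f + (ml.length : Int)) 1)).Pairwise (· < ·) := by
        apply pairwise_update _ _ hS (PySem.List.pairwise_lt_pyRange_one ..)
        intro x hx j hj hjn
        rw [PySem.List.mem_pyRange_one] at hj
        obtain ⟨s, hs, h1, h2, h3⟩ := (hmem x).mp hx
        by_contra hlt
        push Not at hlt
        exact hjn ((hmem j).mpr ⟨s, hs, h1, by omega, by omega⟩)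
      have step := ih (f.toNat + 1) (PySem.Set.update S (PySem.List.pyRange f (f + (ml.length : Int)) 1))
        (by omega) hpair' hmem'
      have hcast : ((f.toNat + 1 : Nat) : Int) = f + 1 := by omega
      rw [hcast] at step
      exact step

-- take m xs = ml (with m = ml.length) is exactly "ml is a prefix of xs".
lemma take_eq_iff_prefix (xs ml : List Char) : xs.take ml.length = ml ↔ ml <+: xs := by
  rw [List.prefix_iff_eq_take]
  exact ⟨fun h => h.symm, fun h => h.symm⟩

-- B's per-index test is exactly MotifCov, for indices in [0, len).
lemma bPred_iff (sl ml : List Char) (i : Int) (h0 : 0 ≤ i) :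
    ((PySem.List.pyRange (max 0 (i - (ml.length : Int) + 1)) (i + 1) 1).any (fun s =>
      PySem.List.slice sl (some s) (some (s + (ml.length : Int))) == ml)) = true ↔
    MotifCov sl ml i := by
  rw [List.any_eq_true]
  constructor
  · rintro ⟨s, hs, heq⟩
    rw [PySem.List.mem_pyRange_one] at hs
    have hs0 : 0 ≤ s := le_trans (le_max_left 0 _) hs.1
    rw [beq_iff_eq, PySem.List.slice_toNat _ hs0 (by omega)] at heq
    have htn : (s + (ml.length : Int)).toNat - s.toNat = ml.length := by omega
    rw [htn, take_eq_iff_prefix] at heq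
    refine ⟨s.toNat, heq, by omega, ?_⟩
    have := hs.1
    have := le_max_right 0 (i - (ml.length : Int) + 1)
    omega
  · rintro ⟨s, h1, h2, h3⟩
    refine ⟨(s : Int), ?_, ?_⟩
    · rw [PySem.List.mem_pyRange_one]
      constructor
      · apply max_le (by positivity); omega
      · omega
    · rw [beq_iff_eq, PySem.List.slice_toNat _ (by positivity) (by positivity)]
      have htn : ((s : Int) + (ml.length : Int)).toNat - ((s : Int)).toNat = ml.length := by omega
      simp only [Int.toNat_natCast] at *
      rw [show ((s : Int) + (ml.length : Int)).toNat - s = ml.length by omega, take_eq_iff_prefix]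
      exact h1

-- Two strictly increasing lists with the same members are equal.
lemma eq_of_pairwise_lt_ext : ∀ (l₁ l₂ : List Int), l₁.Pairwise (· < ·) → l₂.Pairwise (· < ·) →
    (∀ x, x ∈ l₁ ↔ x ∈ l₂) → l₁ = l₂ := by
  intro l₁ l₂ h₁ h₂ hmem
  have hn₁ : l₁.Nodup := h₁.imp (fun h => ne_of_lt h)
  have hn₂ : l₂.Nodup := h₂.imp (fun h => ne_of_lt h)
  have hperm : List.Perm l₁ l₂ := (List.perm_ext_iff_of_nodup hn₁ hn₂).mpr hmem
  exact List.Perm.eq_of_pairwise (fun a b _ _ h1 h2 => by omega) h₁ h₂ hperm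

-- The whole equality, on the list-of-characters level.
lemma main_eq (sl ml : List Char) :
    motifIndicesALoop sl ml ml.length (sl.length + 1) 0 [] =
    PySem.Set.ofList ((PySem.List.pyRange 0 sl.length 1).filter (fun i =>
      (PySem.List.pyRange (max 0 (i - (ml.length : Int) + 1)) (i + 1) 1).any (fun s =>
        PySem.List.slice sl (some s) (some (s + (ml.length : Int))) == ml))) := by
  have hA := aLoop_spec sl ml (sl.length + 1) 0 [] (by omega) (by simp)
    (by intro x; simp [MotifCovB])
  rw [show ((0 : Nat) : Int) = 0 by norm_num] at hA
  have hBpair : ((PySem.List.pyRange 0 sl.length 1).filter (fun i =>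
      (PySem.List.pyRange (max 0 (i - (ml.length : Int) + 1)) (i + 1) 1).any (fun s =>
        PySem.List.slice sl (some s) (some (s + (ml.length : Int))) == ml))).Pairwise (· < ·) :=
    List.Pairwise.filter _ (PySem.List.pairwise_lt_pyRange_one ..)
  have hBmem : ∀ x, x ∈ (PySem.List.pyRange 0 sl.length 1).filter (fun i =>
      (PySem.List.pyRange (max 0 (i - (ml.length : Int) + 1)) (i + 1) 1).any (fun s =>
        PySem.List.slice sl (some s) (some (s + (ml.length : Int))) == ml)) ↔ MotifCov sl ml x := by
    intro x
    rw [List.mem_filter, PySem.List.mem_pyRange_one]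
    constructor
    · rintro ⟨⟨h0, hn⟩, hp⟩
      exact (bPred_iff sl ml x h0).mp hp
    · intro hc
      obtain ⟨s, h1, h2, h3⟩ := hc
      have hne : ml ≠ [] := by rintro rfl; simp at h3; omega
      have := occ_bound h1 hne
      have h0 : 0 ≤ x := by omega
      have hn : x < (sl.length : Int) := by omega
      exact ⟨⟨h0, hn⟩, (bPred_iff sl ml x h0).mpr ⟨s, h1, h2, h3⟩⟩
  rw [PySem.Set.ofList_eq_self_of_nodup _ (hBpair.imp (fun h => ne_of_lt h))]
  exact eq_of_pairwise_lt_ext _ _ hA.1 hBpair (fun x => (hA.2 x).trans (hBmem x).symm)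

-- ===== VERDICT (by name: the statement is the Claim_ definition above) =====
theorem motif_indices_py_spec : Claim_equal_motif_indices_py := by
  intro seq motif _
  unfold Spec_motif_indices_py motif_indices_py motif_indices_py_alt
  exact main_eq seq.toList motif.toList
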